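-- pv_equiv track=rewrite | github.com/Elena-GHub/00_Katas | hackerrank/Day-6-lets-review/characterSeparator.py | split_characters
-- ===== SOURCE A (Python) =====
-- def split_characters(string):
--     odd_characters = ""
--     even_characters = ""
--
--     for letter in range(len(string)):
--         if letter % 2 != 0:
--             odd_characters = odd_characters + string[letter]
--         else:
--             even_characters = even_characters + string[letter]
--
--     processed_string = even_characters + " " + odd_characters
--     return processed_string
-- ===== SOURCE B (Python) =====
-- def split_characters(string):
--     return string[::2] + " " + string[1::2]
-- ===== Notes on version B (the rewrite author's own statement) =====
-- stated objective: idiomatic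
-- what changed: Replaces the index loop with parity branch and O(n^2) string concatenation by two strided slices string[::2] and string[1::2] joined with a space.
import Mathlib
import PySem

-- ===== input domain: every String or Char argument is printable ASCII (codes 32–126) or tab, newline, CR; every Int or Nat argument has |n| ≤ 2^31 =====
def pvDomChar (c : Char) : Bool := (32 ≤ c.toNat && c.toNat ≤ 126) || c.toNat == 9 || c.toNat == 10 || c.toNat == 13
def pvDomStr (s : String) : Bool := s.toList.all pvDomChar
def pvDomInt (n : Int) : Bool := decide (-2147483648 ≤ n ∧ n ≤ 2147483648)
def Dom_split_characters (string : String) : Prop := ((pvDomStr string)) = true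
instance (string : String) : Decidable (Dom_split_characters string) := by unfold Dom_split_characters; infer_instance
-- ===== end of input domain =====

-- B replaces A's index loop (parity branch + quadratic string concatenation) by the
-- two strided slices string[::2] and string[1::2] joined with a space.

-- ===== PORT A =====
def split_characters (string : String) : String :=
  let cs := string.toList
  let st := (PySem.List.pyRange 0 (PySem.List.len cs) 1).foldl
    (fun (acc : List Char × List Char) letter =>
      if PySem.Int.mod letter 2 ≠ 0 then
        (acc.1 ++ [PySem.List.pyGetD cs letter ' '], acc.2)   -- odd_characters + string[letter]
      else
        (acc.1, acc.2 ++ [PySem.List.pyGetD cs letter ' ']))  -- even_characters + string[letter]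
    ([], [])
  String.mk (st.2 ++ [' '] ++ st.1)

-- ===== PORT B =====
def split_characters_alt (string : String) : String :=
  let cs := string.toList
  String.mk (((PySem.List.slice? cs none none 2).getD []) ++ [' ']
             ++ ((PySem.List.slice? cs (some 1) none 2).getD []))

-- ===== PRECONDITION & SPEC =====
def Spec_split_characters (string : String) (out : String) : Prop := out = split_characters_alt string
instance (string : String) (out : String) : Decidable (Spec_split_characters string out) := by unfold Spec_split_characters; infer_instance

-- ===== CLAIM (what is proved, stated in full; the proofs are below) =====
def Claim_equal_split_characters : Prop := ∀ (string : String), Dom_split_characters string → Spec_split_characters string (split_characters string)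

-- ===== LEMMAS AND PROOFS =====
theorem loopA_char (cs : List Char) (n : Nat) :
    (List.range n).foldl
      (fun (acc : List Char × List Char) (k : Nat) =>
        if PySem.Int.mod (k : Int) 2 ≠ 0 then
          (acc.1 ++ [PySem.List.pyGetD cs (k : Int) ' '], acc.2)
        else
          (acc.1, acc.2 ++ [PySem.List.pyGetD cs (k : Int) ' ']))
      ([], [])
    = ((List.range (n / 2)).map (fun k => cs.getD (2 * k + 1) ' '),
       (List.range ((n + 1) / 2)).map (fun k => cs.getD (2 * k) ' ')) := by
  induction n with
  | zero => simp
  | succ n ih =>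
    rw [List.range_succ, List.foldl_append, ih]
    simp only [List.foldl_cons, List.foldl_nil]
    rcases Nat.even_or_odd n with ⟨m, hm⟩ | ⟨m, hm⟩
    · subst hm
      have h2 : PySem.Int.mod ((m + m : Nat) : Int) 2 = 0 := by
        have h := PySem.Int.mod_natCast (m+m) 2
        simp only [Nat.cast_ofNat] at h
        rw [h]; simp; omega
      simp only [h2, ne_eq, not_true_eq_false, if_false]
      rw [show (m + m) / 2 = m by omega, show (m + m + 1) / 2 = m by omega,
          show (m + m + 1 + 1) / 2 = m + 1 by omega, List.range_succ, List.map_append]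
      refine Prod.ext rfl ?_
      simp only [List.map_cons, List.map_nil]
      congr 1
      rw [PySem.List.pyGetD_natCast]
      simp [show 2 * m = m + m by ring]
    · subst hm
      have h2 : PySem.Int.mod ((2 * m + 1 : Nat) : Int) 2 = 1 := by
        have h := PySem.Int.mod_natCast (2*m+1) 2
        simp only [Nat.cast_ofNat] at h
        rw [h]; simp
      simp only [h2, ne_eq, one_ne_zero, not_false_eq_true, if_true]
      rw [show (2 * m + 1) / 2 = m by omega,
          show (2 * m + 1 + 1) / 2 = m + 1 by omega,
          show (2 * m + 1 + 1 + 1) / 2 = m + 1 by omega, List.range_succ, List.map_append]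
      refine Prod.ext ?_ rfl
      rw [List.map_append, PySem.List.pyGetD_natCast]
      simp

theorem sliceB_even (cs : List Char) :
    PySem.List.slice? cs none none 2
      = some ((List.range ((cs.length + 1) / 2)).map (fun k => cs.getD (2 * k) ' ')) := by
  simp only [PySem.List.slice?, PySem.List.sliceIndices]
  norm_num
  by_cases h0 : 0 < cs.length
  · rw [if_pos h0, show (((cs.length : Int) + 2 - 1) / 2).toNat = (cs.length + 1) / 2 by omega]
    apply List.filterMap_eq_map_iff_forall_eq_some.mpr
    intro k hk
    rw [List.mem_range] at hk
    rw [show ((2 * (k : Int))).toNat = 2 * k by omega]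
    rw [List.getElem?_eq_getElem (by omega : 2 * k < cs.length)]
    rfl
  · have h1 : cs.length = 0 := by omega
    simp [h1]

theorem sliceB_odd (cs : List Char) :
    PySem.List.slice? cs (some 1) none 2
      = some ((List.range (cs.length / 2)).map (fun k => cs.getD (2 * k + 1) ' ')) := by
  simp only [PySem.List.slice?, PySem.List.sliceIndices]
  norm_num
  by_cases h0 : cs.length = 0
  · simp [h0]
  · have h1 : min 1 (cs.length : Int) = 1 := by omega
    rw [h1]
    by_cases h2 : 1 < cs.length
    · rw [if_pos h2,
          show (((cs.length : Int) - 1 + 2 - 1) / 2).toNat = cs.length / 2 by omega]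
      apply List.filterMap_eq_map_iff_forall_eq_some.mpr
      intro k hk
      rw [List.mem_range] at hk
      rw [show ((1 + 2 * (k : Int))).toNat = 2 * k + 1 by omega]
      rw [List.getElem?_eq_getElem (by omega : 2 * k + 1 < cs.length)]
      rfl
    · have h3 : cs.length = 1 := by omega
      rw [if_neg h2]
      simp [h3]

-- ===== VERDICT (by name: the statement is the Claim_ definition above) =====
theorem split_characters_spec : Claim_equal_split_characters := by
  intro s _
  unfold Spec_split_characters split_characters split_characters_alt
  simp only [PySem.List.len_eq, PySem.List.pyRange_zero_natCast, List.foldl_map]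
  rw [loopA_char s.toList s.toList.length, sliceB_even, sliceB_odd]
  rfl
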